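-- pv_equiv track=rewrite | github.com/ambrosezero/python-ds-practice | 38_min_max_key_in_dictionary/min_max_key_in_dictionary.py | min_max_keys
-- ===== SOURCE A (Python) =====
-- def min_max_keys(d):
--     """Return tuple (min-keys, max-keys) in d.
--
--         >>> min_max_keys({2: 'a', 7: 'b', 1: 'c', 10: 'd', 4: 'e'})
--         (1, 10)
--
--     Works with any kind of key that can be compared, like strings:
--
--         >>> min_max_keys({"apple": "red", "cherry": "red", "berry": "blue"})
--         ('apple', 'cherry')
--     """
--     first_key = list(d.keys())[0]
--     min = first_key
--     max = first_key
--     for key in list(d.keys()):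
--         if key < min:
--             min = key
--         if key > max:
--             max = key
--     return (min, max)
-- ===== SOURCE B (Python) =====
-- def min_max_keys(d):
--     """Return tuple (min-key, max-key) in d."""
--     s = sorted(d)
--     return (s[0], s[-1])
-- ===== Notes on version B (the rewrite author's own statement) =====
-- stated objective: simpler
-- what changed: B sorts the keys once and reads the extremes off the two ends of the sorted list, instead of A's single tracking loop that maintains running min and max; Pre_ excludes the empty dict, on which both raise IndexError.
import Mathlib
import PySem

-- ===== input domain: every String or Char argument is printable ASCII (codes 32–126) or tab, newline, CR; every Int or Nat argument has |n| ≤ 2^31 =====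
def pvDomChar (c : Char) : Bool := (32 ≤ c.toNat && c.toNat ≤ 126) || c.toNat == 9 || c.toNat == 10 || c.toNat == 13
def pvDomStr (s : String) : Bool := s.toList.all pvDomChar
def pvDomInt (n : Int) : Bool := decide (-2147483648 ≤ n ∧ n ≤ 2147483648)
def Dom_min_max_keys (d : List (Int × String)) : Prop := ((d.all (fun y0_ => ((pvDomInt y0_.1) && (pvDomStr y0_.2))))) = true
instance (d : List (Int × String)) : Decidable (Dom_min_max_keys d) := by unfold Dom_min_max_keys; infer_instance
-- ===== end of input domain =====

-- B sorts the keys once and reads the extremes off the two ends of the sorted list,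
-- instead of A's tracking loop that maintains running min and max (objective: simpler).

-- ===== PORT A =====
def min_max_keys (d : List (Int × String)) : Int × Int :=
  let keys := d.map Prod.fst
  match keys with
  | [] => (0, 0)  -- unreachable under Pre_: Python raises IndexError on list(d.keys())[0]
  | first_key :: _ =>
    keys.foldl (fun st key =>
      (if key < st.1 then key else st.1, if key > st.2 then key else st.2))
      (first_key, first_key)

-- ===== PORT B =====
def min_max_keys_alt (d : List (Int × String)) : Int × Int :=
  let s := PySem.List.sorted (d.map Prod.fst) (fun x => x) false
  ((PySem.List.pyGet? s 0).getD 0, (PySem.List.pyGet? s (-1)).getD 0)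

-- ===== PRECONDITION & SPEC =====
-- Python A raises IndexError on the empty dict (list(d.keys())[0]); B raises there too.
def Pre_min_max_keys (d : List (Int × String)) : Prop := d ≠ []
instance (d : List (Int × String)) : Decidable (Pre_min_max_keys d) := by unfold Pre_min_max_keys; infer_instance
def pvWitness_min_max_keys : (List (Int × String)) := [(1, "a"), (3, "b")]

def Spec_min_max_keys (d : List (Int × String)) (out : Int × Int) : Prop := out = min_max_keys_alt d
instance (d : List (Int × String)) (out : Int × Int) : Decidable (Spec_min_max_keys d out) := by unfold Spec_min_max_keys; infer_instance

-- ===== CLAIM (what is proved, stated in full; the proofs are below) =====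
def Claim_equal_min_max_keys : Prop := ∀ (d : List (Int × String)), Dom_min_max_keys d → Pre_min_max_keys d → Spec_min_max_keys d (min_max_keys d)

-- ===== LEMMAS AND PROOFS =====

-- A's fold result: lower/upper bounds and membership.
theorem foldA_bounds (l : List Int) (a b : Int) :
    (l.foldl (fun st key =>
      ((if key < st.1 then key else st.1 : Int), (if key > st.2 then key else st.2 : Int))) (a, b)).1 ≤ a
    ∧ b ≤ (l.foldl (fun st key =>
      ((if key < st.1 then key else st.1 : Int), (if key > st.2 then key else st.2 : Int))) (a, b)).2
    ∧ (∀ y ∈ l,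
        (l.foldl (fun st key =>
          ((if key < st.1 then key else st.1 : Int), (if key > st.2 then key else st.2 : Int))) (a, b)).1 ≤ y
        ∧ y ≤ (l.foldl (fun st key =>
          ((if key < st.1 then key else st.1 : Int), (if key > st.2 then key else st.2 : Int))) (a, b)).2) := by
  induction l generalizing a b with
  | nil => simp
  | cons x t ih =>
    simp only [List.foldl_cons]
    obtain ⟨h1, h2, h3⟩ := ih (if x < a then x else a) (if x > b then x else b)
    refine ⟨?_, ?_, ?_⟩
    · exact le_trans h1 (by split_ifs with h <;> omega)
    · exact le_trans (by split_ifs with h <;> omega) h2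
    · intro y hy
      rcases List.mem_cons.mp hy with rfl | hy
      · constructor
        · exact le_trans h1 (by split_ifs with h <;> omega)
        · exact le_trans (by split_ifs with h <;> omega) h2
      · exact h3 y hy

theorem foldA_mem (l : List Int) (a b : Int) :
    ((l.foldl (fun st key =>
      ((if key < st.1 then key else st.1 : Int), (if key > st.2 then key else st.2 : Int))) (a, b)).1 = a
      ∨ (l.foldl (fun st key =>
      ((if key < st.1 then key else st.1 : Int), (if key > st.2 then key else st.2 : Int))) (a, b)).1 ∈ l)
    ∧ ((l.foldl (fun st key =>
      ((if key < st.1 then key else st.1 : Int), (if key > st.2 then key else st.2 : Int))) (a, b)).2 = b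
      ∨ (l.foldl (fun st key =>
      ((if key < st.1 then key else st.1 : Int), (if key > st.2 then key else st.2 : Int))) (a, b)).2 ∈ l) := by
  induction l generalizing a b with
  | nil => simp
  | cons x t ih =>
    simp only [List.foldl_cons]
    obtain ⟨h1, h2⟩ := ih (if x < a then x else a) (if x > b then x else b)
    constructor
    · rcases h1 with h | h
      · rw [h]; split_ifs with hx
        · exact Or.inr (List.mem_cons_self)
        · exact Or.inl rfl
      · exact Or.inr (List.mem_cons_of_mem _ h)
    · rcases h2 with h | h
      · rw [h]; split_ifs with hx
        · exact Or.inr (List.mem_cons_self)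
        · exact Or.inl rfl
      · exact Or.inr (List.mem_cons_of_mem _ h)

-- pairwise (≤) list: every element is ≤ its last element
theorem pairwise_le_getLast? (l : List Int) (h : l.Pairwise (· ≤ ·)) (z : Int)
    (hz : l.getLast? = some z) : ∀ y ∈ l, y ≤ z := by
  induction l with
  | nil => simp at hz
  | cons x t ih =>
    intro y hy
    cases t with
    | nil =>
      simp at hz hy; omega
    | cons u v =>
      have hz' : (u :: v).getLast? = some z := by
        simpa [List.getLast?_cons_cons] using hz
      have hp := List.pairwise_cons.mp h
      rcases List.mem_cons.mp hy with rfl | hy'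
      · have hz_mem : z ∈ u :: v := by
          have := List.mem_of_getLast? hz'
          simpa using this
        exact hp.1 z hz_mem
      · exact ih hp.2 hz' y hy'

theorem getLast?_mem_int (l : List Int) (z : Int) (hz : l.getLast? = some z) : z ∈ l :=
  List.mem_of_getLast? hz

-- core equality on a nonempty key list
theorem min_max_core (k : Int) (t : List Int) :
    ((k :: t).foldl (fun st key =>
      ((if key < st.1 then key else st.1 : Int), (if key > st.2 then key else st.2 : Int))) (k, k))
    = ((PySem.List.pyGet? (PySem.List.sorted (k :: t) (fun x => x) false) (0 : Int)).getD 0,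
       (PySem.List.pyGet? (PySem.List.sorted (k :: t) (fun x => x) false) (-1 : Int)).getD 0) := by
  have hsne : PySem.List.sorted (k :: t) (fun x => x) false ≠ [] := by
    intro h
    have := (PySem.List.sorted_eq_nil_iff (xs := k :: t) (key := fun x => x) (rev := false)).mp h
    simp at this
  obtain ⟨m, st, hms⟩ := List.exists_cons_of_ne_nil hsne
  rw [hms]
  -- B's two reads
  have hget0 : (PySem.List.pyGet? (m :: st) (0 : Int)).getD 0 = m := by
    simp [PySem.List.pyGet?, PySem.List.pyIdx?]
  have hlast : ∃ z, (m :: st).getLast? = some z := by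
    cases h : (m :: st).getLast? with
    | none => simp [List.getLast?_eq_none_iff] at h
    | some z => exact ⟨z, rfl⟩
  obtain ⟨z, hz⟩ := hlast
  have hgetm1 : (PySem.List.pyGet? (m :: st) (-1 : Int)).getD 0 = z := by
    have hlen : (m :: st).length ≥ 1 := by simp
    have : PySem.List.pyGet? (m :: st) (-1 : Int) = (m :: st).getLast? := by
      simp [PySem.List.pyGet?, PySem.List.pyIdx?]
      rw [List.getLast?_eq_getElem?]
      simp
    rw [this, hz]; rfl
  rw [hget0, hgetm1]
  -- characterise m and z
  have hperm : (m :: st).Perm (k :: t) := hms ▸ PySem.List.sorted_perm _ _ _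
  have hmem_s : ∀ y, y ∈ m :: st ↔ y ∈ k :: t := fun y => hperm.mem_iff
  have hm_min : ∀ y ∈ k :: t, m ≤ y := by
    intro y hy
    have := PySem.List.key_head_sorted_le (xs := k :: t) (key := fun x => x) (m := m) (t := st) hms
    exact this y hy
  have hpw : (m :: st).Pairwise (· ≤ ·) := by
    have := PySem.List.sorted_pairwise (xs := k :: t) (key := fun x => x)
    simpa [hms] using this
  have hz_max : ∀ y ∈ k :: t, y ≤ z := by
    intro y hy
    exact pairwise_le_getLast? _ hpw z hz y ((hmem_s y).mpr hy)
  have hm_mem : m ∈ k :: t := (hmem_s m).mp List.mem_cons_self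
  have hz_mem : z ∈ k :: t := (hmem_s z).mp (getLast?_mem_int _ z hz)
  -- A's fold result
  obtain ⟨hb1, hb2, hb3⟩ := foldA_bounds (k :: t) k k
  obtain ⟨hmem1, hmem2⟩ := foldA_mem (k :: t) k k
  set r := (k :: t).foldl (fun st key =>
      ((if key < st.1 then key else st.1 : Int), (if key > st.2 then key else st.2 : Int))) (k, k) with hr
  have hr1_mem : r.1 ∈ k :: t := by
    rcases hmem1 with h | h
    · rw [h]; exact List.mem_cons_self
    · exact h
  have hr2_mem : r.2 ∈ k :: t := by
    rcases hmem2 with h | h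
    · rw [h]; exact List.mem_cons_self
    · exact h
  have e1 : r.1 = m := le_antisymm ((hb3 m hm_mem).1) (hm_min _ hr1_mem)
  have e2 : r.2 = z := le_antisymm (hz_max _ hr2_mem) ((hb3 z hz_mem).2)
  exact Prod.ext e1 e2

theorem min_max_eq (d : List (Int × String)) (hd : d ≠ []) :
    min_max_keys d = min_max_keys_alt d := by
  have hk : d.map Prod.fst ≠ [] := by
    intro h; exact hd (List.map_eq_nil_iff.mp h)
  obtain ⟨k, t, h⟩ := List.exists_cons_of_ne_nil hk
  unfold min_max_keys min_max_keys_alt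
  simp only [h]
  exact min_max_core k t

-- ===== VERDICT (by name: the statement is the Claim_ definition above) =====
theorem min_max_keys_spec : Claim_equal_min_max_keys := by
  intro d _ hpre
  unfold Spec_min_max_keys
  exact min_max_eq d hpre
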